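-- pv_equiv track=rewrite | github.com/Kadphol/The-Internship | Question-1/Q1-Acronym.py | get_upper
-- ===== SOURCE A (Python) =====
-- def get_upper(name):
--     word = []
--     upper = ""
--     word = name.split()
--     for s in word:
--         if(s[0].isupper()): #check if split word is upper
--             upper+=s[0]
--     return upper
-- ===== SOURCE B (Python) =====
-- def get_upper(name):
--     upper = ""
--     prev_space = True
--     for c in name:
--         if prev_space and not c.isspace():
--             if c.isupper():
--                 upper += c
--         prev_space = c.isspace()
--     return upper
-- ===== Notes on version B (the rewrite author's own statement) =====
-- stated objective: alternative
-- what changed: Replaces split()-then-loop-over-words with a single character-level pass maintaining a prev_was_space word-boundary flag and appending uppercase word-start characters directly.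
import Mathlib
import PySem

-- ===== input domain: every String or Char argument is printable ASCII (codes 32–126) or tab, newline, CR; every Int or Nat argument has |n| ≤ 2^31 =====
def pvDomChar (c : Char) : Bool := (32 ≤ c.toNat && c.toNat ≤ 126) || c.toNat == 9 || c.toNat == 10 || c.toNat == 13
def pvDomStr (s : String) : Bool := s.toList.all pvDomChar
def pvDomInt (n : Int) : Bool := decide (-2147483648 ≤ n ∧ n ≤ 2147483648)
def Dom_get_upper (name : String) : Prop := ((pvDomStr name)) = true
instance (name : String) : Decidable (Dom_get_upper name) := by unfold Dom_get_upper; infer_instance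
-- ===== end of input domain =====

-- B replaces split-then-loop by a single character scan with a word-boundary flag (alternative decomposition, same cost).


-- ===== PORT A =====
-- for s in name.split(): if s[0].isupper(): upper += s[0]
-- (s[0] via pyGet?; the none branch is unreachable since split() yields nonempty words, upper unchanged there)
def getUpperStep (upper : List Char) (w : List Char) : List Char :=
  match PySem.List.pyGet? w 0 with
  | some c => if PySem.Chars.isupper c then upper ++ [c] else upper
  | none => upper

def get_upper (name : String) : String :=
  String.ofList ((PySem.Chars.split₀ name.toList).foldl getUpperStep [])

-- ===== PORT B =====
-- single pass: prev_was_space flag; at a word start append the char if uppercase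
def getUpperScan (s : List Char) (prev : Bool) (out : List Char) : List Char :=
  match s with
  | [] => out
  | c :: rest =>
      getUpperScan rest (PySem.Chars.isspace c)
        (if prev && !PySem.Chars.isspace c && PySem.Chars.isupper c then out ++ [c] else out)

def get_upper_alt (name : String) : String :=
  String.ofList (getUpperScan name.toList true [])

-- ===== PRECONDITION & SPEC =====
def Spec_get_upper (name : String) (out : String) : Prop := out = get_upper_alt name
instance (name : String) (out : String) : Decidable (Spec_get_upper name out) := by unfold Spec_get_upper; infer_instance

-- ===== CLAIM (what is proved, stated in full; the proofs are below) =====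
def Claim_equal_get_upper : Prop := ∀ (name : String), Dom_get_upper name → Spec_get_upper name (get_upper name)

-- ===== LEMMAS AND PROOFS =====

theorem go_acc (s : List Char) (cur : List Char) (acc : List (List Char)) :
    PySem.Chars.split₀.go s cur acc = acc.reverse ++ PySem.Chars.split₀.go s cur [] := by
  induction s generalizing cur acc with
  | nil =>
      simp only [PySem.Chars.split₀.go]
      by_cases h : cur.isEmpty <;> simp [h]
  | cons c rest ih =>
      simp only [PySem.Chars.split₀.go]
      by_cases hs : PySem.Chars.isspace c
      · by_cases h : cur.isEmpty
        · simp only [hs, h, if_true]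
          exact ih [] acc
        · simp only [hs, h, if_true, if_false, Bool.false_eq_true]
          rw [ih [] (cur.reverse :: acc), ih [] [cur.reverse]]
          simp
      · simp only [hs, Bool.false_eq_true, if_false]
        exact ih (c :: cur) acc

theorem step_head (b : Char) (w u : List Char) :
    getUpperStep u (b :: w) = if PySem.Chars.isupper b then u ++ [b] else u := by
  simp [getUpperStep, PySem.List.pyGet?, PySem.List.pyIdx?]

theorem step_rev (cur : List Char) (h : cur ≠ []) (u : List Char) :
    getUpperStep u cur.reverse =
      if PySem.Chars.isupper (cur.getLastD ' ') then u ++ [cur.getLastD ' '] else u := by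
  have h1 : cur.reverse = cur.getLast h :: cur.dropLast.reverse := by
    conv_lhs => rw [← List.dropLast_append_getLast h]
    simp
  have h2 : cur.getLastD ' ' = cur.getLast h := by
    simp [List.getLastD_eq_getLast?, List.getLast?_eq_some_getLast h]
  rw [h1, h2, step_head]

theorem main_scan (s : List Char) (cur : List Char) (u : List Char) :
    (PySem.Chars.split₀.go s cur []).foldl getUpperStep u =
      getUpperScan s cur.isEmpty
        (if cur.isEmpty then u
         else if PySem.Chars.isupper (cur.getLastD ' ') then u ++ [cur.getLastD ' '] else u) := by
  induction s generalizing cur u with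
  | nil =>
      by_cases h : cur.isEmpty
      · simp [PySem.Chars.split₀.go, getUpperScan, h]
      · have hne : cur ≠ [] := by simpa using h
        simp only [PySem.Chars.split₀.go, h, if_false, Bool.false_eq_true, getUpperScan,
          List.reverse_cons, List.reverse_nil, List.nil_append, List.foldl_cons, List.foldl_nil]
        rw [step_rev cur hne]
  | cons c rest ih =>
      simp only [PySem.Chars.split₀.go]
      by_cases hs : PySem.Chars.isspace c
      · by_cases h : cur.isEmpty
        · have hc : cur = [] := List.isEmpty_iff.mp h
          subst hc
          simp only [List.isEmpty_nil, hs, if_true]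
          rw [ih []]
          simp [getUpperScan, hs]
        · have hne : cur ≠ [] := by simpa using h
          simp only [hs, h, if_true, if_false, Bool.false_eq_true]
          rw [go_acc rest [] [cur.reverse], List.foldl_append]
          simp only [List.reverse_cons, List.reverse_nil, List.nil_append, List.foldl_cons, List.foldl_nil]
          rw [step_rev cur hne, ih []]
          simp [getUpperScan, hs]
      · simp only [hs, Bool.false_eq_true, if_false]
        cases cur with
        | nil =>
            rw [ih [c]]
            simp [getUpperScan, hs]
        | cons a t =>
            rw [ih (c :: a :: t)]
            simp [getUpperScan, hs]

-- ===== VERDICT (by name: the statement is the Claim_ definition above) =====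
theorem get_upper_spec : Claim_equal_get_upper := by
  intro name _
  show get_upper name = get_upper_alt name
  unfold get_upper get_upper_alt PySem.Chars.split₀
  rw [main_scan]
  simp
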